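-- pv_equiv track=rewrite | github.com/danidanicarrotcarrot/algorithm | programmers/level2/기출문제/이진변환반복하기.py | solution
-- ===== SOURCE A (Python) =====
-- def solution(s):
--     cnt = 0 # 반복횟수
--     zero = 0 # 제거된 0 개수
--
--     while True:
--         if s == '1':
--             break
--         zero += s.count('0')
--         s = s.replace('0', '')
--         s = len(s)
--         res = str()
--         while s:
--             res += str(s%2)
--             s = s//2
--         s = res[::-1]
--         cnt += 1
--
--     return cnt, zero
-- ===== SOURCE B (Python) =====
-- def solution(s):
--     # Bottom-up DP table over integers: steps[k]/zeros[k] describe the whole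
--     # trajectory starting from integer k; the answer is a single table lookup.
--     if s == '1':
--         return 0, 0
--     z0 = s.count('0')
--     n = len(s) - z0
--     steps = [0, 0]
--     zeros = [0, 0]
--     for k in range(2, n + 1):
--         p = bin(k).count('1')
--         steps.append(steps[p] + 1)
--         zeros.append(zeros[p] + k.bit_length() - p)
--     return steps[n] + 1, z0 + zeros[n]
-- ===== Notes on version B (the rewrite author's own statement) =====
-- stated objective: alternative
-- what changed: B replaces A's round-by-round simulation (rebuilding and scanning a binary string each iteration) with a bottom-up dynamic-programming table over integers 2..n, indexed by the current value, so the answer is a single table lookup instead of running the loop on the input at all.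
-- outside the precondition, e.g. on solution('0'): A does not finish within the time limit, B returns (1, 1)
import Mathlib
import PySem

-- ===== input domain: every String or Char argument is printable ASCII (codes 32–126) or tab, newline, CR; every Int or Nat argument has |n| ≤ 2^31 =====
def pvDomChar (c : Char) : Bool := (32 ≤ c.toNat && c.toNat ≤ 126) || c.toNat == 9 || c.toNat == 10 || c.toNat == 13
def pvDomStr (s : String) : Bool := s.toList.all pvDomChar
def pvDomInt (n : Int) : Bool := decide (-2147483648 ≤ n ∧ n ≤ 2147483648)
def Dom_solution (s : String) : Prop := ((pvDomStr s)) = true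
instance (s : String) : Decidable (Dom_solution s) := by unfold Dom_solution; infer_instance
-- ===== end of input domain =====

-- B replaces A's round-by-round simulation with string rebuilding by a bottom-up DP table
-- over integers, answered by one table lookup (objective: alternative).

-- ===== PORT A =====
-- inner loop 'while s: res += str(s % 2); s = s // 2' — s here is a length, hence a Nat
-- (Python's % and // on nonnegative ints coincide with Nat % and /; str via PySem.Int.toStr)
def aDigits (n : Nat) : List Char :=
  if _h : n = 0 then []
  else (PySem.Int.toStr (PySem.Int.mod (n : Int) 2)).toList ++ aDigits (n / 2)
decreasing_by exact Nat.div_lt_self (Nat.pos_of_ne_zero _h) one_lt_two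

-- outer 'while True' loop, fueled (A never terminates on strings with no non-'0' character;
-- Pre_solution excludes those, and on admitted inputs fuel length+2 is never exhausted).
-- res[::-1] is reversal; strings are handled as their char lists via PySem.Chars primitives.
def aLoop : Nat → List Char → Int → Int → Int × Int
  | 0, _, cnt, zero => (cnt, zero)
  | fuel + 1, cs, cnt, zero =>
    if cs = ['1'] then (cnt, zero)
    else
      let zero' := zero + (PySem.Chars.count cs ['0'] : Int)
      let cs1 := PySem.Chars.replace cs ['0'] []
      let n := cs1.length
      let res := aDigits n
      aLoop fuel res.reverse (cnt + 1) zero'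

def solution (s : String) : Int × Int :=
  aLoop (s.toList.length + 2) s.toList 0 0

-- ===== PORT B =====
-- body of Source B's for-loop: append steps[p]+1 and zeros[p]+k.bit_length()-p to the tables
-- (the list indexings steps[p], zeros[p] are always in range, so getD is exact here;
-- bit_length ≥ popcount, so the Nat subtraction is exact)
def bStep (st : List Nat × List Nat) (k : Int) : List Nat × List Nat :=
  let p := PySem.Int.bitCount k
  (st.1 ++ [st.1.getD p 0 + 1],
   st.2 ++ [st.2.getD p 0 + (PySem.Int.bitLength k - p)])

def solution_alt (s : String) : Int × Int :=
  if s.toList = ['1'] then (0, 0)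
  else
    let z0 := PySem.Chars.count s.toList ['0']
    -- n = len(s) - z0: count('0') ≤ len(s), so Nat subtraction is exact here
    let n := s.toList.length - z0
    let tbl := (PySem.List.pyRange 2 ((n : Int) + 1) 1).foldl bStep ([0, 0], [0, 0])
    ((tbl.1.getD n 0 : Int) + 1, (z0 : Int) + (tbl.2.getD n 0 : Int))

-- ===== PRECONDITION & SPEC =====
-- Pre_ excludes strings with no character other than '0' (empty or all-'0'): on those A's
-- outer loop never terminates, so A returns no value there.
def Pre_solution (s : String) : Prop := s.toList.any (fun c => c != '0') = true
instance (s : String) : Decidable (Pre_solution s) := by unfold Pre_solution; infer_instance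

def pvWitness_solution : String := "0110"

def Spec_solution (s : String) (out : Int × Int) : Prop := out = solution_alt s
instance (s : String) (out : Int × Int) : Decidable (Spec_solution s out) := by unfold Spec_solution; infer_instance

-- ===== CLAIM (what is proved, stated in full; the proofs are below) =====
def Claim_equal_solution : Prop := ∀ (s : String), Dom_solution s → Pre_solution s → Spec_solution s (solution s)

-- ===== LEMMAS AND PROOFS =====

-- ---- string-primitive characterisations (single-character needle) ----
lemma count_go_single (c : Char) : ∀ (l : List Char) (f acc : Nat), l.length ≤ f →
    PySem.Chars.count.go [c] f l acc = acc + l.count c := by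
  intro l
  induction l with
  | nil => intro f acc _; cases f <;> simp [PySem.Chars.count.go]
  | cons h t ih =>
    intro f acc hf
    cases f with
    | zero => simp at hf
    | succ f =>
      rw [PySem.Chars.count.go]
      have hl : t.length ≤ f := by simpa using hf
      by_cases hc : h = c
      · subst hc
        have e1 : ([h].isPrefixOf (h :: t)) = true := by simp [List.isPrefixOf]
        have e2 : List.drop [h].length (h :: t) = t := by simp
        rw [e1, if_pos rfl, e2, ih f (acc + 1) hl]
        simp
        omega
      · have e1 : ([c].isPrefixOf (h :: t)) = false := by
          simp [List.isPrefixOf]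
          exact fun hh => (hc hh.symm).elim
        rw [e1]
        simp only [Bool.false_eq_true, if_false]
        rw [ih f acc hl]
        simp [hc]

lemma count_single (c : Char) (l : List Char) : PySem.Chars.count l [c] = l.count c := by
  simpa [PySem.Chars.count] using count_go_single c l l.length 0 le_rfl

lemma replace_go_single (c : Char) : ∀ (l : List Char) (f : Nat) (acc : List Char), l.length ≤ f →
    PySem.Chars.replace.go [c] [] f l acc = acc.reverse ++ l.filter (fun x => x != c) := by
  intro l
  induction l with
  | nil => intro f acc _; cases f <;> simp [PySem.Chars.replace.go]
  | cons h t ih =>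
    intro f acc hf
    cases f with
    | zero => simp at hf
    | succ f =>
      rw [PySem.Chars.replace.go]
      have hl : t.length ≤ f := by simpa using hf
      by_cases hc : h = c
      · subst hc
        have e1 : ([h].isPrefixOf (h :: t)) = true := by simp [List.isPrefixOf]
        have e2 : List.drop [h].length (h :: t) = t := by simp
        rw [e1, if_pos rfl, e2, ih f _ hl]
        simp
      · have e1 : ([c].isPrefixOf (h :: t)) = false := by
          simp [List.isPrefixOf]
          exact fun hh => (hc hh.symm).elim
        rw [e1]
        simp only [Bool.false_eq_true, if_false]
        rw [ih f (h :: acc) hl]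
        simp [hc]

lemma replace_single (c : Char) (l : List Char) :
    PySem.Chars.replace l [c] [] = l.filter (fun x => x != c) := by
  simpa [PySem.Chars.replace] using replace_go_single c l l.length [] le_rfl

lemma filter_len_plus_count (l : List Char) :
    (l.filter (fun x => x != '0')).length + l.count '0' = l.length := by
  induction l with
  | nil => simp
  | cons h t ih =>
    by_cases hc : h = '0' <;> simp [hc, ← ih] <;> omega

lemma filter_len_count (l : List Char) (hm : ∀ c ∈ l, c = '0' ∨ c = '1') :
    (l.filter (fun x => x != '0')).length = l.count '1' := by
  induction l with
  | nil => simp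
  | cons h t ih =>
    have ht : ∀ x ∈ t, x = '0' ∨ x = '1' := fun x hx => hm x (by simp [hx])
    rcases hm h (by simp) with hc | hc <;> subst hc <;> simp [ih ht]

-- ---- the binary string built by A's inner loop ----
lemma toChars_mod_two (n : Nat) :
    (PySem.Int.toStr (PySem.Int.mod (n : Int) 2)).toList = [if n % 2 = 1 then '1' else '0'] := by
  have h : PySem.Int.mod (n : Int) 2 = ((n % 2 : Nat) : Int) := by
    simp [PySem.Int.mod, Int.fmod_eq_emod]
  rw [h]
  rcases Nat.mod_two_eq_zero_or_one n with h2 | h2 <;> simp [h2] <;> decide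

lemma aDigits_eq (n : Nat) (h : n ≠ 0) :
    aDigits n = (if n % 2 = 1 then '1' else '0') :: aDigits (n / 2) := by
  rw [aDigits, dif_neg h, toChars_mod_two]
  simp

lemma aDigits_zero : aDigits 0 = [] := by rw [aDigits]; simp

lemma bitCount_le (n : Nat) : PySem.Int.bitCount (n : Int) ≤ n := by
  induction n using Nat.strong_induction_on with
  | _ n ih =>
    rcases Nat.eq_zero_or_pos n with h | h
    · subst h; simp
    · rw [PySem.Int.bitCount_natCast h]
      have := ih (n / 2) (Nat.div_lt_self h one_lt_two)
      omega

lemma bitCount_pos (n : Nat) (h : 1 ≤ n) : 1 ≤ PySem.Int.bitCount (n : Int) := by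
  induction n using Nat.strong_induction_on with
  | _ n ih =>
    rw [PySem.Int.bitCount_natCast h]
    rcases Nat.mod_two_eq_zero_or_one n with h2 | h2
    · have hn : 1 ≤ n / 2 := by omega
      have := ih (n / 2) (Nat.div_lt_self h one_lt_two) hn
      omega
    · omega

lemma bitCount_lt (n : Nat) (h : 2 ≤ n) : PySem.Int.bitCount (n : Int) < n := by
  rw [PySem.Int.bitCount_natCast (by omega)]
  have := bitCount_le (n / 2)
  omega

lemma aDigits_count_one (n : Nat) (h : 1 ≤ n) :
    (aDigits n).count '1' = PySem.Int.bitCount (n : Int) := by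
  induction n using Nat.strong_induction_on with
  | _ n ih =>
    rw [aDigits_eq n (by omega), PySem.Int.bitCount_natCast h]
    rcases Nat.eq_zero_or_pos (n / 2) with h2 | h2
    · have hn1 : n = 1 := by omega
      subst hn1
      simp [aDigits_zero]
    · have hih := ih (n / 2) (Nat.div_lt_self h one_lt_two) h2
      rcases Nat.mod_two_eq_zero_or_one n with hm | hm
      · rw [if_neg (by omega), List.count_cons_of_ne (by decide), hih]
        omega
      · rw [if_pos hm, List.count_cons_self, hih]
        omega

lemma aDigits_count_zero (n : Nat) (h : 1 ≤ n) :
    (aDigits n).count '0' = PySem.Int.bitLength (n : Int) - PySem.Int.bitCount (n : Int) := by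
  induction n using Nat.strong_induction_on with
  | _ n ih =>
    rw [aDigits_eq n (by omega), PySem.Int.bitLength_natCast h, PySem.Int.bitCount_natCast h]
    rcases Nat.eq_zero_or_pos (n / 2) with h2 | h2
    · have hn1 : n = 1 := by omega
      subst hn1
      simp [aDigits_zero]
    · have hle := PySem.Int.bitCount_le_bitLength ((n / 2 : Nat) : Int)
      have hih := ih (n / 2) (Nat.div_lt_self h one_lt_two) h2
      rcases Nat.mod_two_eq_zero_or_one n with hm | hm
      · rw [if_neg (by omega), List.count_cons_self, hih]
        omega
      · rw [if_pos hm, List.count_cons_of_ne (by decide), hih]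
        omega

lemma aDigits_nonzero (n : Nat) (h : 1 ≤ n) : aDigits n ≠ [] := by
  rw [aDigits_eq n (by omega)]; simp

lemma aDigits_rev_eq_one (n : Nat) (h : 1 ≤ n) :
    (aDigits n).reverse = ['1'] ↔ n = 1 := by
  constructor
  · intro hrev
    have hlist : aDigits n = ['1'] := by
      have := congrArg List.reverse hrev
      simpa using this
    rw [aDigits_eq n (by omega)] at hlist
    have h2 : aDigits (n / 2) = [] := by
      cases hl : aDigits (n / 2) <;> simp [hl] at hlist ⊢
    by_contra hne
    exact aDigits_nonzero (n / 2) (by omega) h2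
  · rintro rfl
    rw [aDigits_eq 1 (by omega)]
    simp [aDigits_zero]

lemma aDigits_mem (n : Nat) : ∀ c ∈ aDigits n, c = '0' ∨ c = '1' := by
  induction n using Nat.strong_induction_on with
  | _ n ih =>
    rcases Nat.eq_zero_or_pos n with h | h
    · subst h; simp [aDigits_zero]
    · rw [aDigits_eq n (by omega)]
      intro c hc
      rcases List.mem_cons.mp hc with hc | hc
      · subst hc; split_ifs <;> simp
      · exact ih (n / 2) (Nat.div_lt_self h one_lt_two) c hc

-- ---- closed trajectory functions (proof device cutting both programs' loops apart) ----
def specS (k : Nat) : Nat :=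
  if _h : k ≤ 1 then 0 else specS (PySem.Int.bitCount (k : Int)) + 1
decreasing_by exact bitCount_lt k (by omega)

def specZ (k : Nat) : Nat :=
  if _h : k ≤ 1 then 0
  else specZ (PySem.Int.bitCount (k : Int)) +
    (PySem.Int.bitLength (k : Int) - PySem.Int.bitCount (k : Int))
decreasing_by exact bitCount_lt k (by omega)

lemma specS_le_one (k : Nat) (h : k ≤ 1) : specS k = 0 := by rw [specS]; simp [h]
lemma specZ_le_one (k : Nat) (h : k ≤ 1) : specZ k = 0 := by rw [specZ]; simp [h]
lemma specS_ge (k : Nat) (h : 2 ≤ k) :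
    specS k = specS (PySem.Int.bitCount (k : Int)) + 1 := by
  rw [specS]; simp [show ¬ k ≤ 1 by omega]
lemma specZ_ge (k : Nat) (h : 2 ≤ k) :
    specZ k = specZ (PySem.Int.bitCount (k : Int)) +
      (PySem.Int.bitLength (k : Int) - PySem.Int.bitCount (k : Int)) := by
  rw [specZ]; simp [show ¬ k ≤ 1 by omega]

-- ---- A's loop computes the trajectory functions ----
lemma aLoop_spec : ∀ n, 1 ≤ n → ∀ f cnt zero, n ≤ f →
    aLoop f ((aDigits n).reverse) cnt zero = (cnt + (specS n : Int), zero + (specZ n : Int)) := by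
  intro n
  induction n using Nat.strong_induction_on with
  | _ n ih =>
    intro h1 f cnt zero hf
    obtain ⟨f', rfl⟩ : ∃ f', f = f' + 1 := ⟨f - 1, by omega⟩
    by_cases hone : n = 1
    · subst hone
      rw [aLoop]
      simp [(aDigits_rev_eq_one 1 (by omega)).mpr rfl, specS_le_one, specZ_le_one]
    · have h2 : 2 ≤ n := by omega
      rw [aLoop]
      have hnot : ¬ (aDigits n).reverse = ['1'] := by
        rw [aDigits_rev_eq_one n h1]; exact hone
      rw [if_neg hnot]
      have hcnt0 : PySem.Chars.count (aDigits n).reverse ['0']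
          = PySem.Int.bitLength (n : Int) - PySem.Int.bitCount (n : Int) := by
        rw [count_single, List.count_reverse, aDigits_count_zero n h1]
      have hrepl : (PySem.Chars.replace (aDigits n).reverse ['0'] []).length
          = PySem.Int.bitCount (n : Int) := by
        rw [replace_single, List.filter_reverse, List.length_reverse,
          filter_len_count (aDigits n) (aDigits_mem n), aDigits_count_one n h1]
      simp only [hcnt0, hrepl]
      have hones1 : 1 ≤ PySem.Int.bitCount (n : Int) := bitCount_pos n h1
      have honeslt : PySem.Int.bitCount (n : Int) < n := bitCount_lt n h2
      rw [ih (PySem.Int.bitCount (n : Int)) honeslt hones1 f' (cnt + 1) _ (by omega)]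
      rw [specS_ge n h2, specZ_ge n h2]
      have hle := PySem.Int.bitCount_le_bitLength ((n : Nat) : Int)
      rw [Prod.mk.injEq]
      refine ⟨?_, ?_⟩ <;> push_cast [Nat.cast_sub hle] <;> ring

-- ---- B's DP table holds the trajectory functions ----
lemma getD_append_lt (l l' : List Nat) (j : Nat) (h : j < l.length) :
    (l ++ l').getD j 0 = l.getD j 0 := by
  simp [List.getD_eq_getElem?_getD, List.getElem?_append_left h]

lemma getD_append_self (l : List Nat) (x : Nat) :
    (l ++ [x]).getD l.length 0 = x := by
  simp [List.getD_eq_getElem?_getD]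

lemma tbl_spec : ∀ m : Nat, 1 ≤ m →
    ((PySem.List.pyRange 2 ((m : Int) + 1) 1).foldl bStep ([0, 0], [0, 0])).1.length = m + 1 ∧
    ((PySem.List.pyRange 2 ((m : Int) + 1) 1).foldl bStep ([0, 0], [0, 0])).2.length = m + 1 ∧
    ∀ j ≤ m,
      ((PySem.List.pyRange 2 ((m : Int) + 1) 1).foldl bStep ([0, 0], [0, 0])).1.getD j 0 = specS j ∧
      ((PySem.List.pyRange 2 ((m : Int) + 1) 1).foldl bStep ([0, 0], [0, 0])).2.getD j 0 = specZ j := by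
  intro m
  induction m with
  | zero => omega
  | succ m ih =>
    intro _
    by_cases hm : 1 ≤ m
    · obtain ⟨hl1, hl2, hj⟩ := ih hm
      have hsplit : PySem.List.pyRange 2 ((m : Int) + 1 + 1) 1
          = PySem.List.pyRange 2 ((m : Int) + 1) 1 ++ [(m : Int) + 1] :=
        PySem.List.pyRange_one_succ_right (by omega)
      have hcast : ((m + 1 : Nat) : Int) + 1 = (m : Int) + 1 + 1 := by push_cast; ring
      rw [hcast, hsplit, List.foldl_append]
      set T := (PySem.List.pyRange 2 ((m : Int) + 1) 1).foldl bStep ([0, 0], [0, 0]) with hT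
      have hp : PySem.Int.bitCount ((m : Int) + 1) = PySem.Int.bitCount ((m + 1 : Nat) : Int) := by
        norm_num
      have hplt : PySem.Int.bitCount ((m + 1 : Nat) : Int) < m + 1 := bitCount_lt (m + 1) (by omega)
      simp only [List.foldl, bStep, hp]
      refine ⟨by simp [hl1], by simp [hl2], ?_⟩
      intro j hjle
      rcases Nat.lt_or_ge j (m + 1) with hjlt | hjge
      · have h1 := (hj j (by omega)).1
        have h2 := (hj j (by omega)).2
        rw [getD_append_lt _ _ j (by omega), getD_append_lt _ _ j (by omega)]
        exact ⟨h1, h2⟩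
      · have hjeq : j = m + 1 := by omega
        subst hjeq
        have hpm : PySem.Int.bitCount ((m + 1 : Nat) : Int) ≤ m := by omega
        have hS := (hj _ hpm).1
        have hZ := (hj _ hpm).2
        have e1 : (T.1 ++ [T.1.getD (PySem.Int.bitCount ((m + 1 : Nat) : Int)) 0 + 1]).getD (m + 1) 0
            = T.1.getD (PySem.Int.bitCount ((m + 1 : Nat) : Int)) 0 + 1 := by
          have := getD_append_self T.1 (T.1.getD (PySem.Int.bitCount ((m + 1 : Nat) : Int)) 0 + 1)
          rwa [hl1] at this
        have e2 : (T.2 ++ [T.2.getD (PySem.Int.bitCount ((m + 1 : Nat) : Int)) 0 +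
              (PySem.Int.bitLength ((m : Int) + 1) - PySem.Int.bitCount ((m + 1 : Nat) : Int))]).getD (m + 1) 0
            = T.2.getD (PySem.Int.bitCount ((m + 1 : Nat) : Int)) 0 +
              (PySem.Int.bitLength ((m : Int) + 1) - PySem.Int.bitCount ((m + 1 : Nat) : Int)) := by
          have := getD_append_self T.2 (T.2.getD (PySem.Int.bitCount ((m + 1 : Nat) : Int)) 0 +
              (PySem.Int.bitLength ((m : Int) + 1) - PySem.Int.bitCount ((m + 1 : Nat) : Int)))
          rwa [hl2] at this
        rw [e1, e2, hS, hZ]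
        have hbl : PySem.Int.bitLength ((m : Int) + 1) = PySem.Int.bitLength ((m + 1 : Nat) : Int) := by
          norm_num
        rw [hbl, specS_ge (m + 1) (by omega), specZ_ge (m + 1) (by omega)]
        exact ⟨rfl, rfl⟩
    · have hm0 : m = 0 := by omega
      subst hm0
      have hnil : PySem.List.pyRange 2 ((1 : Nat) + 1 : Int) 1 = [] := by
        apply PySem.List.pyRange_one_eq_nil
        norm_num
      rw [hnil]
      refine ⟨rfl, rfl, ?_⟩
      intro j hj
      interval_cases j <;>
        simp [List.getD, specS_le_one, specZ_le_one]

-- ===== VERDICT (by name: the statement is the Claim_ definition above) =====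
theorem solution_spec : Claim_equal_solution := by
  intro s _ hpre
  unfold Spec_solution solution solution_alt
  unfold Pre_solution at hpre
  by_cases h1 : s.toList = ['1']
  · rw [aLoop, if_pos h1, if_pos h1]
  · rw [if_neg h1, aLoop, if_neg h1]
    have hcount : PySem.Chars.count s.toList ['0'] = s.toList.count '0' :=
      count_single '0' s.toList
    have hrepl : PySem.Chars.replace s.toList ['0'] [] = s.toList.filter (fun x => x != '0') :=
      replace_single '0' s.toList
    have hfl := filter_len_plus_count s.toList
    have hn1 : 1 ≤ (s.toList.filter (fun x => x != '0')).length := by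
      rcases List.any_eq_true.mp hpre with ⟨c, hcmem, hcne⟩
      have hmem : c ∈ s.toList.filter (fun x => x != '0') :=
        List.mem_filter.mpr ⟨hcmem, hcne⟩
      have := List.length_pos_of_mem hmem
      omega
    have hlenle : (s.toList.filter (fun x => x != '0')).length ≤ s.toList.length :=
      List.length_filter_le _ _
    simp only [hrepl]
    set n := (s.toList.filter (fun x => x != '0')).length with hn
    rw [aLoop_spec n hn1 (s.toList.length + 1) (0 + 1)
      (0 + (PySem.Chars.count s.toList ['0'] : Int)) (by omega)]
    obtain ⟨_, _, hj⟩ := tbl_spec n hn1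
    have hneq : s.toList.length - PySem.Chars.count s.toList ['0'] = n := by
      rw [hcount]; omega
    rw [hneq]
    obtain ⟨hS, hZ⟩ := hj n le_rfl
    rw [hS, hZ, hcount]
    rw [Prod.mk.injEq]
    refine ⟨?_, ?_⟩ <;> push_cast <;> ring
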